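-- pv_equiv track=rewrite | github.com/Jij-Inc/Qamomile | qamomile/circuit/frontend/type_check.py | _infer_homogeneous_types
-- ===== SOURCE A (Python) =====
-- import typing
--
-- def _infer_homogeneous_types(
--     pairs: typing.Iterable[tuple[str, str]],
-- ) -> tuple[str, str] | None:
--     """Return ``(key_type, val_type)`` if all pairs are the same, else ``None``."""
--     key_type: str | None = None
--     val_type: str | None = None
--     for k, v in pairs:
--         if key_type is None:
--             key_type, val_type = k, v
--         elif k != key_type or v != val_type:
--             return None
--     if key_type is None:
--         return None
--     return (key_type, val_type)
-- ===== SOURCE B (Python) =====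
-- def _infer_homogeneous_types(pairs):
--     seen = set()
--     for k, v in pairs:
--         seen.add((k, v))
--     return seen.pop() if len(seen) == 1 else None
-- ===== Notes on version B (the rewrite author's own statement) =====
-- stated objective: simpler
-- what changed: Replaces the compare-each-pair-against-the-first scan with stateful early return by collecting the distinct pairs into a set and returning its sole element iff its cardinality is 1.
import Mathlib
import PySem

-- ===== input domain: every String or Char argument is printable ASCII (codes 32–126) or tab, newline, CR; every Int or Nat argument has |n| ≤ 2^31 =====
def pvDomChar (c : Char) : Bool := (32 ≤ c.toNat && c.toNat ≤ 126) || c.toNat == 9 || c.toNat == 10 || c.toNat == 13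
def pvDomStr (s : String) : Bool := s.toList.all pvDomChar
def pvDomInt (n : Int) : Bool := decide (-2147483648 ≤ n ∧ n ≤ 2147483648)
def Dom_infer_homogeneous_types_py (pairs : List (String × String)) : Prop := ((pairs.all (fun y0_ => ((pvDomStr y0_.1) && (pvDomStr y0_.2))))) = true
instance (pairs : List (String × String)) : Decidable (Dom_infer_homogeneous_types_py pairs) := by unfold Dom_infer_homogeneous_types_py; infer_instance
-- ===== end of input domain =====

-- B collects the distinct pairs into a set and returns its sole element iff the
-- cardinality is 1, replacing A's compare-against-the-first scan with early return.

-- ===== PORT A =====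
-- the loop 'for k, v in pairs' with state (key_type, val_type), early 'return None' on mismatch
def inferLoopA (st : Option (String × String)) : List (String × String) → Option (String × String)
  | [] => st
  | (k, v) :: rest =>
    match st with
    | none => inferLoopA (some (k, v)) rest
    | some (kt, vt) => if k ≠ kt ∨ v ≠ vt then none else inferLoopA (some (kt, vt)) rest

def infer_homogeneous_types_py (pairs : List (String × String)) : Option (String × String) :=
  match inferLoopA none pairs with
  | none => none          -- 'if key_type is None: return None'
  | some (kt, vt) => some (kt, vt)

-- ===== PORT B =====
def infer_homogeneous_types_py_alt (pairs : List (String × String)) : Option (String × String) :=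
  -- seen = set(); for k, v in pairs: seen.add((k, v))
  let seen : PySem.Set (String × String) := pairs.foldl PySem.Set.add PySem.Set.empty
  -- return seen.pop() if len(seen) == 1 else None  (pop on a 1-element set yields that element)
  if PySem.Set.len seen = 1 then seen.head? else none

-- ===== PRECONDITION & SPEC =====
def Spec_infer_homogeneous_types_py (pairs : List (String × String)) (out : Option (String × String)) : Prop := out = infer_homogeneous_types_py_alt pairs
instance (pairs : List (String × String)) (out : Option (String × String)) : Decidable (Spec_infer_homogeneous_types_py pairs out) := by unfold Spec_infer_homogeneous_types_py; infer_instance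

-- ===== CLAIM (what is proved, stated in full; the proofs are below) =====
def Claim_equal_infer_homogeneous_types_py : Prop := ∀ (pairs : List (String × String)), Dom_infer_homogeneous_types_py pairs → Spec_infer_homogeneous_types_py pairs (infer_homogeneous_types_py pairs)

-- ===== LEMMAS AND PROOFS =====

theorem inferLoopA_some (p : String × String) (rest : List (String × String)) :
    inferLoopA (some p) rest = if rest.all (· = p) then some p else none := by
  induction rest with
  | nil => simp [inferLoopA]
  | cons q rest ih =>
    obtain ⟨k, v⟩ := q
    obtain ⟨kt, vt⟩ := p
    simp only [inferLoopA, List.all_cons]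
    by_cases h : k = kt ∧ v = vt
    · obtain ⟨h1, h2⟩ := h
      subst h1; subst h2
      rw [ih]
      by_cases hall : (rest.all fun x => decide (x = (k, v))) = true
      · simp [hall]
      · simp [hall]
    · have : k ≠ kt ∨ v ≠ vt := by tauto
      simp only [if_pos this]
      have : ¬ ((k, v) = (kt, vt)) := by
        intro he; exact h ⟨congrArg Prod.fst he, congrArg Prod.snd he⟩
      simp [this]

theorem foldl_add_mem {α : Type} [BEq α] [LawfulBEq α] (rest : List α) (s : List α) (x : α)
    (hx : x ∈ s) : x ∈ rest.foldl PySem.Set.add s := by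
  induction rest generalizing s with
  | nil => exact hx
  | cons y rest ih =>
    rw [List.foldl_cons]
    apply ih
    simp only [PySem.Set.add]
    split
    · exact hx
    · exact List.mem_append_left _ hx

theorem foldl_add_mem_elem {α : Type} [BEq α] [LawfulBEq α] (rest : List α) (s : List α) (x : α)
    (hx : x ∈ rest) : x ∈ rest.foldl PySem.Set.add s := by
  induction rest generalizing s with
  | nil => cases hx
  | cons y rest ih =>
    rcases List.mem_cons.mp hx with h | h
    · subst h
      rw [List.foldl_cons]
      apply foldl_add_mem
      simp only [PySem.Set.add]
      split
      · rename_i hc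
        exact List.mem_of_elem_eq_true hc
      · exact List.mem_append_right _ (List.mem_singleton.mpr rfl)
    · rw [List.foldl_cons]; exact ih _ h

theorem foldl_add_all_eq (p : String × String) (rest : List (String × String))
    (h : rest.all (· = p)) : rest.foldl PySem.Set.add [p] = [p] := by
  induction rest with
  | nil => rfl
  | cons q rest ih =>
    simp only [List.all_cons, Bool.and_eq_true, decide_eq_true_eq] at h
    obtain ⟨h1, h2⟩ := h
    have hadd : PySem.Set.add [p] p = [p] := by
      unfold PySem.Set.add
      simp [PySem.Set.contains]
    rw [List.foldl_cons, h1, hadd]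
    exact ih h2

theorem two_mem_length {α : Type} (l : List α) (x y : α) (hx : x ∈ l) (hy : y ∈ l)
    (hne : x ≠ y) : ¬ l.length = 1 := by
  intro hl
  match l, hl with
  | [a], _ =>
    simp only [List.mem_singleton] at hx hy
    exact hne (hx.trans hy.symm)

theorem alt_cons (p : String × String) (rest : List (String × String)) :
    infer_homogeneous_types_py_alt (p :: rest) =
      if rest.all (· = p) then some p else none := by
  unfold infer_homogeneous_types_py_alt
  have hstep : PySem.Set.add (PySem.Set.empty : PySem.Set (String × String)) p = [p] := by
    simp [PySem.Set.add, PySem.Set.empty, PySem.Set.contains]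
  simp only [List.foldl_cons, hstep]
  by_cases h : rest.all (· = p)
  · rw [foldl_add_all_eq p rest h]
    simp [h, PySem.Set.len]
  · rw [if_neg h]
    have h' : ∃ q ∈ rest, q ≠ p := by
      simpa [List.all_eq_true] using h
    obtain ⟨q, hq, hqp⟩ := h'
    have hp : p ∈ rest.foldl PySem.Set.add [p] := foldl_add_mem rest [p] p (by simp)
    have hqm : q ∈ rest.foldl PySem.Set.add [p] := foldl_add_mem_elem rest [p] q hq
    have : ¬ (rest.foldl PySem.Set.add [p]).length = 1 :=
      two_mem_length _ q p hqm hp hqp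
    rw [if_neg]
    intro hc
    apply this
    unfold PySem.Set.len at hc
    exact_mod_cast hc

-- ===== VERDICT (by name: the statement is the Claim_ definition above) =====
theorem infer_homogeneous_types_py_spec : Claim_equal_infer_homogeneous_types_py := by
  intro pairs _
  unfold Spec_infer_homogeneous_types_py
  cases pairs with
  | nil => rfl
  | cons p rest =>
    rw [alt_cons]
    unfold infer_homogeneous_types_py
    simp only [inferLoopA, inferLoopA_some]
    split <;> rename_i h <;> simp [h]
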